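-- pv_equiv track=rewrite | github.com/Engr-Nyx/FSL | app/translation/sentence_mapper.py | _collapse_fingerspelling
-- ===== SOURCE A (Python) =====
-- def _collapse_fingerspelling(glosses: list[str]) -> list[str]:
--     result, buf = [], []
--     for g in glosses:
--         if len(g) == 1 and g.isalpha():
--             buf.append(g)
--         else:
--             if buf:
--                 result.append("".join(buf))
--                 buf.clear()
--             result.append(g)
--     if buf:
--         result.append("".join(buf))
--     return result
-- ===== SOURCE B (Python) =====
-- def _collapse_fingerspelling(glosses: list[str]) -> list[str]:
--     def is_letter(g):
--         return len(g) == 1 and g.isalpha()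
--     result = []
--     i, n = 0, len(glosses)
--     while i < n:
--         if is_letter(glosses[i]):
--             j = i
--             while j < n and is_letter(glosses[j]):
--                 j += 1
--             result.append("".join(glosses[i:j]))
--             i = j
--         else:
--             result.append(glosses[i])
--             i += 1
--     return result
-- ===== Notes on version B (the rewrite author's own statement) =====
-- stated objective: alternative
-- what changed: Replaces A's buffer-accumulate-and-flush state machine with a two-pointer run scanner: at each letter it scans the whole run forward, joins the slice at once, and jumps past it, so no pending buffer is ever maintained.
import Mathlib
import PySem

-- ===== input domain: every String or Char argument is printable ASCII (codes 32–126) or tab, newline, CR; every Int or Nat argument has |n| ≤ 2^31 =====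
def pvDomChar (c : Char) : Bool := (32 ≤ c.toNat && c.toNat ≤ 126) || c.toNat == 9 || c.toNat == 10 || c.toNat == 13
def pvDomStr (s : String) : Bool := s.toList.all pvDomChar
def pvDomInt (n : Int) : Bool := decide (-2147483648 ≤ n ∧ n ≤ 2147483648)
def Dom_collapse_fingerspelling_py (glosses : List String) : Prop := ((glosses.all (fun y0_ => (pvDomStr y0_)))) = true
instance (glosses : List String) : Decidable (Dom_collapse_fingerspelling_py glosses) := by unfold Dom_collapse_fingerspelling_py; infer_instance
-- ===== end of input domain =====

-- B replaces A's buffer-accumulate-and-flush state machine with a two-pointer run scanner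
-- (scan each letter run forward, join it at once, jump past it): alternative decomposition, same cost.


-- shared predicate: Python's `len(g) == 1 and g.isalpha()`
def pvIsLetter (g : String) : Bool := PySem.Str.len g == 1 && PySem.Str.strIsalpha g

-- ===== PORT A =====
-- A: fold over the glosses carrying (result, buf); flush buf on each non-letter and at the end.
def collapse_fingerspelling_py (glosses : List String) : List String :=
  let st := glosses.foldl
    (fun (rb : List String × List String) g =>
      if pvIsLetter g then (rb.1, rb.2 ++ [g])
      else ((if rb.2 ≠ [] then rb.1 ++ [PySem.Str.join "" rb.2] else rb.1) ++ [g], []))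
    ([], [])
  if st.2 ≠ [] then st.1 ++ [PySem.Str.join "" st.2] else st.1

-- ===== PORT B =====
-- B: structural recursion; on a letter, take the whole leading letter run, join it, drop it.
def collapse_fingerspelling_py_alt : List String → List String
  | [] => []
  | g :: rest =>
    if pvIsLetter g then
      PySem.Str.join "" ((g :: rest).takeWhile pvIsLetter)
        :: collapse_fingerspelling_py_alt ((g :: rest).dropWhile pvIsLetter)
    else
      g :: collapse_fingerspelling_py_alt rest
  termination_by gs => gs.length
  decreasing_by
    · simp_all [List.dropWhile]
      exact Nat.le_of_lt_succ (Nat.lt_succ_of_le (List.length_dropWhile_le pvIsLetter rest))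
    · simp

-- ===== PRECONDITION & SPEC =====
def Spec_collapse_fingerspelling_py (glosses : List String) (out : List String) : Prop := out = collapse_fingerspelling_py_alt glosses
instance (glosses : List String) (out : List String) : Decidable (Spec_collapse_fingerspelling_py glosses out) := by unfold Spec_collapse_fingerspelling_py; infer_instance

-- ===== CLAIM (what is proved, stated in full; the proofs are below) =====
def Claim_equal_collapse_fingerspelling_py : Prop := ∀ (glosses : List String), Dom_collapse_fingerspelling_py glosses → Spec_collapse_fingerspelling_py glosses (collapse_fingerspelling_py glosses)

-- ===== LEMMAS AND PROOFS =====

-- abbreviations for A's fold step and finishing flush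
def pvStep (rb : List String × List String) (g : String) : List String × List String :=
  if pvIsLetter g then (rb.1, rb.2 ++ [g])
  else ((if rb.2 ≠ [] then rb.1 ++ [PySem.Str.join "" rb.2] else rb.1) ++ [g], [])

def pvFinish (rb : List String × List String) : List String :=
  if rb.2 ≠ [] then rb.1 ++ [PySem.Str.join "" rb.2] else rb.1

-- the accumulated result is a pure prefix of the fold state
theorem pvStep_prefix (gs : List String) (r r' buf : List String) :
    gs.foldl pvStep (r ++ r', buf) = (r ++ (gs.foldl pvStep (r', buf)).1, (gs.foldl pvStep (r', buf)).2) := by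
  induction gs generalizing r' buf with
  | nil => rfl
  | cons g tl ih =>
    simp only [List.foldl_cons, pvStep]
    by_cases h : pvIsLetter g
    · simp [h, ih]
    · simp only [h, Bool.false_eq_true, if_false]
      by_cases hb : buf = []
      · subst hb; simpa using ih (r' ++ [g]) []
      · simp only [hb, ne_eq, not_false_iff, if_true]
        rw [show r ++ r' ++ [PySem.Str.join "" buf] ++ [g] = r ++ (r' ++ [PySem.Str.join "" buf] ++ [g]) by simp]
        exact ih _ []

-- main invariant
theorem pvMain (gs : List String) (buf : List String) :
    pvFinish (gs.foldl pvStep ([], buf)) =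
      if buf = [] then collapse_fingerspelling_py_alt gs
      else PySem.Str.join "" (buf ++ gs.takeWhile pvIsLetter)
             :: collapse_fingerspelling_py_alt (gs.dropWhile pvIsLetter) := by
  induction gs generalizing buf with
  | nil =>
    by_cases hb : buf = [] <;>
      simp [hb, pvFinish, collapse_fingerspelling_py_alt]
  | cons g tl ih =>
    simp only [List.foldl_cons, pvStep]
    by_cases hl : pvIsLetter g
    · simp only [hl, if_true]
      have := ih (buf ++ [g])
      rw [if_neg (by simp)] at this
      rw [this]
      by_cases hb : buf = []
      · subst hb
        simp [collapse_fingerspelling_py_alt, hl]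
      · simp [hb, hl]
    · simp only [hl, Bool.false_eq_true, if_false]
      have hpref := pvStep_prefix tl ((if buf ≠ [] then [PySem.Str.join "" buf] else []) ++ [g]) [] []
      rw [show ((if buf ≠ [] then ([] : List String) ++ [PySem.Str.join "" buf] else []) ++ [g], ([] : List String))
            = (((if buf ≠ [] then [PySem.Str.join "" buf] else []) ++ [g]) ++ [], ([] : List String)) by simp]
      rw [hpref]
      have hfin : ∀ (r : List String) (st : List String × List String),
          pvFinish (r ++ st.1, st.2) = r ++ pvFinish st := by
        intro r st
        unfold pvFinish
        by_cases h2 : st.2 = [] <;> simp [h2]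
      rw [hfin]
      rw [ih []]
      rw [if_pos rfl]
      by_cases hb : buf = []
      · subst hb
        simp [collapse_fingerspelling_py_alt, hl]
      · simp [hb, hl, collapse_fingerspelling_py_alt]

-- ===== VERDICT (by name: the statement is the Claim_ definition above) =====
theorem collapse_fingerspelling_py_spec : Claim_equal_collapse_fingerspelling_py := by
  intro gs _
  unfold Spec_collapse_fingerspelling_py collapse_fingerspelling_py
  have := pvMain gs []
  show pvFinish (gs.foldl pvStep ([], [])) = collapse_fingerspelling_py_alt gs
  simpa using this
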